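-- pv_equiv track=rewrite | github.com/jansenk/advent2020 | advent/solutions/day20.py | perm_dragon
-- ===== SOURCE A (Python) =====
-- dragon = [
-- 	(0, 0),
-- 	(1, 1),
-- 	(4, 1),
-- 	(5, 0),
-- 	(6, 0),
-- 	(7, 1),
-- 	(10, 1),
-- 	(11, 0),
-- 	(12, 0),
-- 	(13, 1),
-- 	(16, 1),
-- 	(17, 0),
-- 	(18, -1),
-- 	(18, 0),
-- 	(19, 0)
-- ]
--
-- def rotate_point_clockwise__graph(p):
-- 	x, y = p
-- 	return y, -x
--
-- def flip_point__graph(p):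
-- 	x, y = p
-- 	return x, -y
--
-- def perm_dragon(perm):
-- 		rotations = perm % 4
-- 		flip = perm > 3
-- 		result = dragon
-- 		if flip:
-- 			result = [flip_point__graph(p) for p in result]
-- 		for _ in range(rotations):
-- 			result = [rotate_point_clockwise__graph(p) for p in result]
-- 		return result
-- ===== SOURCE B (Python) =====
-- dragon = [
-- 	(0, 0),
-- 	(1, 1),
-- 	(4, 1),
-- 	(5, 0),
-- 	(6, 0),
-- 	(7, 1),
-- 	(10, 1),
-- 	(11, 0),
-- 	(12, 0),
-- 	(13, 1),
-- 	(16, 1),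
-- 	(17, 0),
-- 	(18, -1),
-- 	(18, 0),
-- 	(19, 0)
-- ]
--
-- # net linear map = (flip first if perm > 3) then clockwise rotation (perm % 4) times
-- _COEFF = {
--     (False, 0): (1, 0, 0, 1),
--     (False, 1): (0, 1, -1, 0),
--     (False, 2): (-1, 0, 0, -1),
--     (False, 3): (0, -1, 1, 0),
--     (True, 0): (1, 0, 0, -1),
--     (True, 1): (0, -1, -1, 0),
--     (True, 2): (-1, 0, 0, 1),
--     (True, 3): (0, 1, 1, 0),
-- }
--
-- def perm_dragon(perm):
--     a, b, c, d = _COEFF[(perm > 3, perm % 4)]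
--     return [(a * x + b * y, c * x + d * y) for x, y in dragon]
-- ===== Notes on version B (the rewrite author's own statement) =====
-- stated objective: simpler
-- what changed: Replaces the optional flip pass plus the rotation loop (up to 4 successive list rebuilds) with a single table lookup of the composed linear map's coefficients and one list-comprehension pass over the points.
import Mathlib
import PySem

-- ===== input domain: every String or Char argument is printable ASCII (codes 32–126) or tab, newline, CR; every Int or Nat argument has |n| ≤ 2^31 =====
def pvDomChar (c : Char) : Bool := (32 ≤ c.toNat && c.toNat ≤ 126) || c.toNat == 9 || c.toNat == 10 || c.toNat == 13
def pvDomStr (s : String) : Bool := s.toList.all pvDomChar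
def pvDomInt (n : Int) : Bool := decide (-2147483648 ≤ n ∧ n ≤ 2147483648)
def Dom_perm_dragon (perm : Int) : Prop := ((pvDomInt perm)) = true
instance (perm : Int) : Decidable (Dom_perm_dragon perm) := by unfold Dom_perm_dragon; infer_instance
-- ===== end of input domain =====

-- B replaces A's flip pass + rotation loop by one lookup of the composed linear map and a single map pass (objective: simpler).
-- ===== PORT A =====
def pvDragon : List (Int × Int) :=
  [(0, 0), (1, 1), (4, 1), (5, 0), (6, 0), (7, 1), (10, 1), (11, 0),
   (12, 0), (13, 1), (16, 1), (17, 0), (18, -1), (18, 0), (19, 0)]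

def rotate_point_clockwise__graph (p : Int × Int) : Int × Int := (p.2, -p.1)

def flip_point__graph (p : Int × Int) : Int × Int := (p.1, -p.2)

def perm_dragon (perm : Int) : List (Int × Int) :=
  let rotations := PySem.Int.mod perm 4
  let flip := perm > 3
  let result := pvDragon
  let result := if flip then result.map flip_point__graph else result
  (PySem.List.pyRange 0 rotations 1).foldl
    (fun res _ => res.map rotate_point_clockwise__graph) result

-- ===== PORT B =====
-- the _COEFF table of Source B: net transform coefficients for (flip, perm % 4)
def pvCoeff (flip : Bool) (r : Int) : Int × Int × Int × Int :=
  if flip then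
    if r = 0 then (1, 0, 0, -1)
    else if r = 1 then (0, -1, -1, 0)
    else if r = 2 then (-1, 0, 0, 1)
    else (0, 1, 1, 0)
  else
    if r = 0 then (1, 0, 0, 1)
    else if r = 1 then (0, 1, -1, 0)
    else if r = 2 then (-1, 0, 0, -1)
    else (0, -1, 1, 0)

def perm_dragon_alt (perm : Int) : List (Int × Int) :=
  match pvCoeff (decide (perm > 3)) (PySem.Int.mod perm 4) with
  | (a, b, c, d) => pvDragon.map (fun p => (a * p.1 + b * p.2, c * p.1 + d * p.2))

-- ===== PRECONDITION & SPEC =====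
def Spec_perm_dragon (perm : Int) (out : List (Int × Int)) : Prop := out = perm_dragon_alt perm
instance (perm : Int) (out : List (Int × Int)) : Decidable (Spec_perm_dragon perm out) := by unfold Spec_perm_dragon; infer_instance

-- ===== CLAIM (what is proved, stated in full; the proofs are below) =====
def Claim_equal_perm_dragon : Prop := ∀ (perm : Int), Dom_perm_dragon perm → Spec_perm_dragon perm (perm_dragon perm)

-- ===== LEMMAS AND PROOFS =====

-- ===== VERDICT (by name: the statement is the Claim_ definition above) =====
theorem perm_dragon_spec : Claim_equal_perm_dragon := by
  intro perm _
  unfold Spec_perm_dragon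
  have h0 : (0:Int) < 4 := by norm_num
  have h1 := PySem.Int.mod_nonneg perm h0
  have h2 := PySem.Int.mod_lt perm h0
  have hr : PySem.Int.mod perm 4 = 0 ∨ PySem.Int.mod perm 4 = 1 ∨
      PySem.Int.mod perm 4 = 2 ∨ PySem.Int.mod perm 4 = 3 := by omega
  by_cases hf : perm > 3 <;>
    rcases hr with h | h | h | h <;>
      simp only [perm_dragon, perm_dragon_alt, h, hf, decide_true, decide_false,
        if_true, if_false, not_false_iff] <;> decide
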